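-- pv_equiv track=rewrite | github.com/francisco-perez-sorrosal/ai-assistants-cfg | memory-mcp/src/memory_mcp/store.py | _find_auto_links
-- ===== SOURCE A (Python) =====
-- AUTO_LINK_TAG_OVERLAP_THRESHOLD = 2
--
-- MAX_AUTO_LINKS_PER_REMEMBER = 3
--
-- AUTO_LINK_RELATION = "related-to"
--
-- def _find_auto_links(
--     category: str,
--     new_key: str,
--     new_tags: list[str],
--     cat_entries: dict[str, dict],
-- ) -> list[dict]:
--     """Find entries in the same category with 2+ tag overlap for auto-linking.
--
--     Returns a list of link dicts (max MAX_AUTO_LINKS_PER_REMEMBER).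
--     """
--     if not new_tags:
--         return []
--
--     new_tag_set = {t.lower() for t in new_tags}
--     auto_links: list[dict] = []
--
--     for existing_key, entry in cat_entries.items():
--         if existing_key == new_key:
--             continue
--
--         existing_tags = {t.lower() for t in entry.get("tags", [])}
--         overlap = len(new_tag_set & existing_tags)
--         if overlap >= AUTO_LINK_TAG_OVERLAP_THRESHOLD:
--             target_ref = f"{category}.{existing_key}"
--             auto_links.append({
--                 "target": target_ref,
--                 "relation": AUTO_LINK_RELATION,
--             })
--             if len(auto_links) >= MAX_AUTO_LINKS_PER_REMEMBER:
--                 break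
--
--     return auto_links
-- ===== SOURCE B (Python) =====
-- AUTO_LINK_TAG_OVERLAP_THRESHOLD = 2
--
-- MAX_AUTO_LINKS_PER_REMEMBER = 3
--
-- AUTO_LINK_RELATION = "related-to"
--
--
-- def _find_auto_links(
--     category: str,
--     new_key: str,
--     new_tags: list[str],
--     cat_entries: dict[str, dict],
-- ) -> list[dict]:
--     """Inverted-pass version: accumulate per-entry tag-overlap counts tag by tag,
--     then select qualifying entries in dict order and keep the first 3."""
--     items = list(cat_entries.items())
--     tag_sets = [frozenset(t.lower() for t in entry.get("tags", [])) for _, entry in items]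
--     counts = [0] * len(items)
--     for t in {t.lower() for t in new_tags}:
--         for i, tags in enumerate(tag_sets):
--             if t in tags:
--                 counts[i] += 1
--     links = [
--         {"target": f"{category}.{key}", "relation": AUTO_LINK_RELATION}
--         for (key, _), c in zip(items, counts)
--         if key != new_key and c >= AUTO_LINK_TAG_OVERLAP_THRESHOLD
--     ]
--     return links[:MAX_AUTO_LINKS_PER_REMEMBER]
-- ===== Notes on version B (the rewrite author's own statement) =====
-- stated objective: alternative
-- what changed: Replaces the single entry loop with per-entry set intersection and an early break by a tag-major counting pass (an overlap counter accumulated tag by tag over all entries) followed by a separate selection pass that filters qualifying keys in dict order and slices the first 3 links.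
import Mathlib
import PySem

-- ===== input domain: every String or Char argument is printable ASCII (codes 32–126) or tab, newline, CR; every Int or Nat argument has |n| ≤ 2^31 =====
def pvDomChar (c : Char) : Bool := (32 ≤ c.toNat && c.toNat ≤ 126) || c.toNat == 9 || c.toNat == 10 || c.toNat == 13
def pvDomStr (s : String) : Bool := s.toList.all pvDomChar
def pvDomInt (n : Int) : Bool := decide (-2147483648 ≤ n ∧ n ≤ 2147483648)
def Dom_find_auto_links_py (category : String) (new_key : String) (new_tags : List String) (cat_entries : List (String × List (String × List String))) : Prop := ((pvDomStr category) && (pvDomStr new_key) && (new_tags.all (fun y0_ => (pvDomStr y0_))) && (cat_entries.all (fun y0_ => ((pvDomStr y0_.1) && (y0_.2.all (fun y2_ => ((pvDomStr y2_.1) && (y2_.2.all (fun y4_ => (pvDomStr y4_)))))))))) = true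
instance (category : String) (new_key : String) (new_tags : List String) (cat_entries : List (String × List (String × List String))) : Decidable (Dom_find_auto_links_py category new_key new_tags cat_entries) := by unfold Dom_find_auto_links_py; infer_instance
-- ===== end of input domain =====

-- B replaces A's per-entry set-intersection loop with an early break by a tag-major counting
-- pass plus a separate filter-and-slice selection pass (alternative decomposition, same cost).


-- ===== PORT A =====
-- the 'for existing_key, entry in cat_entries.items():' loop, with 'auto_links' as accumulator
def pvALoop (category : String) (new_key : String) (S : PySem.Set String) :
    List (String × List (String × List String)) → List (List (String × String)) →
    List (List (String × String))
  | [], acc => acc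
  | (existing_key, entry) :: rest, acc =>
    if existing_key == new_key then pvALoop category new_key S rest acc
    else
      let existing_tags : PySem.Set String :=
        PySem.Set.ofList ((PySem.Dict.getD (PySem.Dict.mk entry) "tags" []).map PySem.Str.lower)
      let overlap := PySem.Set.len (PySem.Set.inter S existing_tags)
      if overlap ≥ 2 then
        let acc' := acc ++ [[("target", category ++ "." ++ existing_key), ("relation", "related-to")]]
        if acc'.length ≥ 3 then acc' else pvALoop category new_key S rest acc'
      else pvALoop category new_key S rest acc

def find_auto_links_py (category : String) (new_key : String) (new_tags : List String) (cat_entries : List (String × List (String × List String))) : List (List (String × String)) :=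
  if new_tags = [] then []
  else
    let new_tag_set : PySem.Set String := PySem.Set.ofList (new_tags.map PySem.Str.lower)
    pvALoop category new_key new_tag_set cat_entries []

-- ===== PORT B =====
def find_auto_links_py_alt (category : String) (new_key : String) (new_tags : List String) (cat_entries : List (String × List (String × List String))) : List (List (String × String)) :=
  let tagSets : List (PySem.Set String) := cat_entries.map (fun ke =>
    PySem.Set.ofList ((PySem.Dict.getD (PySem.Dict.mk ke.2) "tags" []).map PySem.Str.lower))
  let counts : List Nat :=
    (PySem.Set.ofList (new_tags.map PySem.Str.lower)).foldl
      (fun cs t => List.zipWith (fun (c : Nat) tags => if t ∈ tags then c + 1 else c) cs tagSets)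
      (List.replicate cat_entries.length 0)
  let links := ((cat_entries.zip counts).filter
      (fun p => p.1.1 != new_key && decide (p.2 ≥ 2))).map
    (fun p => [("target", category ++ "." ++ p.1.1), ("relation", "related-to")])
  links.take 3

-- ===== PRECONDITION & SPEC =====
def Spec_find_auto_links_py (category : String) (new_key : String) (new_tags : List String) (cat_entries : List (String × List (String × List String))) (out : List (List (String × String))) : Prop := out = find_auto_links_py_alt category new_key new_tags cat_entries
instance (category : String) (new_key : String) (new_tags : List String) (cat_entries : List (String × List (String × List String))) (out : List (List (String × String))) : Decidable (Spec_find_auto_links_py category new_key new_tags cat_entries out) := by unfold Spec_find_auto_links_py; infer_instance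

-- ===== CLAIM (what is proved, stated in full; the proofs are below) =====
def Claim_equal_find_auto_links_py : Prop := ∀ (category : String) (new_key : String) (new_tags : List String) (cat_entries : List (String × List (String × List String))), Dom_find_auto_links_py category new_key new_tags cat_entries → Spec_find_auto_links_py category new_key new_tags cat_entries (find_auto_links_py category new_key new_tags cat_entries)

-- ===== LEMMAS AND PROOFS =====

-- lowered tag set of one entry (proof abbreviation)
def pvLow (entry : List (String × List String)) : PySem.Set String :=
  PySem.Set.ofList ((PySem.Dict.getD (PySem.Dict.mk entry) "tags" []).map PySem.Str.lower)

-- zipWith of a mapped copy of the same list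
theorem pv_zipWith_map_self {α β : Type} (f : β → α → β) (g : α → β) (ls : List α) :
    List.zipWith f (ls.map g) ls = ls.map (fun l => f (g l) l) := by
  induction ls with
  | nil => rfl
  | cons x xs ih => simp [ih]

-- the counting fold computes, per entry, the number of tags of ts it contains
theorem pv_counts (ts : List String) (ls : List (PySem.Set String)) (g : PySem.Set String → Nat) :
    ts.foldl (fun cs t => List.zipWith (fun (c : Nat) tags => if t ∈ tags then c + 1 else c) cs ls)
      (ls.map g)
    = ls.map (fun l => g l + (ts.filter (fun t => decide (t ∈ l))).length) := by
  induction ts generalizing g with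
  | nil => simp
  | cons t ts ih =>
    simp only [List.foldl_cons]
    rw [pv_zipWith_map_self]
    rw [ih]
    apply List.map_congr_left
    intro l _
    by_cases h : t ∈ l
    · simp [h]; omega
    · simp [h]

-- Python's S & l, in S's order, is the sublist of S of elements of l
theorem pv_inter_eq (S : PySem.Set String) (l : PySem.Set String) :
    PySem.Set.inter S l = S.filter (fun t => decide (t ∈ l)) := by
  simp only [PySem.Set.inter]
  apply List.filter_congr
  intro x _
  simp [List.contains_eq_mem]

-- A's selection condition for one entry, as a Boolean predicate
def pvCond (new_key : String) (S : PySem.Set String)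
    (ke : String × List (String × List String)) : Bool :=
  ke.1 != new_key && decide (PySem.Set.len (PySem.Set.inter S (pvLow ke.2)) ≥ 2)

-- A's loop with the break equals (filtered links).take (3 - acc.length)
theorem pv_loop (category new_key : String) (S : PySem.Set String) :
    ∀ (rest : List (String × List (String × List String))) (acc : List (List (String × String))),
    acc.length < 3 →
    pvALoop category new_key S rest acc
      = acc ++ ((rest.filter (pvCond new_key S)).map
          (fun ke => [("target", category ++ "." ++ ke.1), ("relation", "related-to")])).take
          (3 - acc.length) := by
  intro rest
  induction rest with
  | nil => intro acc h; simp [pvALoop]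
  | cons ke rest ih =>
    intro acc h
    obtain ⟨k, entry⟩ := ke
    simp only [pvALoop]
    by_cases hk : (k == new_key) = true
    · rw [if_pos hk, ih acc h]
      have hc : ¬ pvCond new_key S (k, entry) = true := by
        simp [pvCond, show k = new_key from by simpa using hk]
      rw [List.filter_cons_of_neg hc]
    · rw [if_neg hk]
      have hkne : k ≠ new_key := by simpa using hk
      by_cases hov : PySem.Set.len (PySem.Set.inter S (pvLow entry)) ≥ 2
      · have hc : pvCond new_key S (k, entry) = true := by
          simp only [pvCond, Bool.and_eq_true, decide_eq_true_eq]
          exact ⟨by simpa using hk, hov⟩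
        rw [if_pos (by simpa [pvLow, PySem.Set.len] using hov), List.filter_cons_of_pos hc]
        by_cases hbrk : (acc ++ [[("target", category ++ "." ++ k), ("relation", "related-to")]]).length ≥ 3
        · rw [if_pos hbrk]
          have h2 : 3 - acc.length = 1 := by simp at hbrk; omega
          simp [h2]
        · rw [if_neg hbrk]
          rw [ih _ (by simp at hbrk ⊢; omega)]
          rw [List.map_cons, List.take_cons (by omega)]
          simp only [List.append_assoc, List.singleton_append, List.length_append,
            List.length_cons, List.length_nil]
          congr 2
      · have hc : ¬ pvCond new_key S (k, entry) = true := by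
          simp only [pvCond, Bool.and_eq_true, decide_eq_true_eq, not_and]
          exact fun _ => hov
        rw [if_neg (by simpa [pvLow, PySem.Set.len] using hov), ih acc h,
          List.filter_cons_of_neg hc]

-- B's count-based selection condition equals A's
theorem pv_filter_eq (new_key : String) (S : PySem.Set String)
    (l : List (String × List (String × List String))) :
    l.filter (fun ke => ke.1 != new_key &&
        decide ((S.filter (fun t => decide (t ∈ pvLow ke.2))).length ≥ 2))
      = l.filter (pvCond new_key S) := by
  apply List.filter_congr
  intro ke _
  simp only [pvCond]
  congr 1
  simp [pv_inter_eq]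

-- B unfolded to the same filtered-links list
theorem pv_alt_eq (category new_key : String) (new_tags : List String)
    (cat_entries : List (String × List (String × List String))) :
    find_auto_links_py_alt category new_key new_tags cat_entries
      = ((cat_entries.filter (fun ke =>
            ke.1 != new_key && decide (((PySem.Set.ofList (new_tags.map PySem.Str.lower)).filter
              (fun t => decide (t ∈ pvLow ke.2))).length ≥ 2))).map
          (fun ke => [("target", category ++ "." ++ ke.1), ("relation", "related-to")])).take 3 := by
  unfold find_auto_links_py_alt
  dsimp only
  have hzip : ∀ (G : String × List (String × List String) → Nat),
      cat_entries.zip (cat_entries.map G) = cat_entries.map (fun ke => (ke, G ke)) := by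
    intro G
    induction cat_entries with
    | nil => rfl
    | cons x xs ih => simp [ih]
  have hrep : (List.replicate cat_entries.length (0 : Nat))
      = List.map (fun _ => (0 : Nat)) (cat_entries.map (fun ke => pvLow ke.2)) := by
    rw [List.map_map, show ((fun _ => (0 : Nat)) ∘ (fun ke : String × List (String × List String) => pvLow ke.2)) = (fun _ => (0 : Nat)) from rfl]
    simp [List.map_const']
  have hc := pv_counts (PySem.Set.ofList (new_tags.map PySem.Str.lower))
      (cat_entries.map (fun ke => pvLow ke.2)) (fun _ => 0)
  simp only [pvLow] at hrep hc
  rw [hrep, hc, List.map_map, hzip, List.filter_map, List.map_map]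
  simp only [Function.comp_def, Nat.zero_add, pvLow]
  rfl

-- ===== VERDICT (by name: the statement is the Claim_ definition above) =====
theorem find_auto_links_py_spec : Claim_equal_find_auto_links_py := by
  intro category new_key new_tags cat_entries _
  unfold Spec_find_auto_links_py
  rw [pv_alt_eq]
  unfold find_auto_links_py
  by_cases hnt : new_tags = []
  · simp [hnt, pvLow, PySem.Set.ofList]
  · simp only [hnt, if_false]
    rw [pv_loop category new_key _ cat_entries [] (by simp), pv_filter_eq]
    simp
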